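-- pv_equiv track=rewrite | github.com/Govindabhakta/tugas-besar-pengkom | routeFind.py | connectedNodes
-- ===== SOURCE A (Python) =====
-- street = [
--     [0, 3, 6],
--     [2, 3, 5],
--     [3, 5, 7],
--     [0, 4, 5],
--     [1, 2, 5],
--     [1, 5, 7],
--     [1, 4, 5]
-- ]
--
-- def connectedNodes(currentNode):
--     nodes = ""
--     for i in range(7):
--         #Mencari jalan yang terhubung dengan A
--         #Menambahkan indeksnya ke routes, dan menambahkan indeks jalan akhirnya ke routesEnd
--         if street[i][0] == currentNode:
--             nodes = nodes + str(street[i][1])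
--         elif street[i][1] == currentNode:
--             nodes = nodes + str(street[i][0])
--
--     return nodes
-- ===== SOURCE B (Python) =====
-- street = [
--     [0, 3, 6],
--     [2, 3, 5],
--     [3, 5, 7],
--     [0, 4, 5],
--     [1, 2, 5],
--     [1, 5, 7],
--     [1, 4, 5]
-- ]
--
-- def connectedNodes(currentNode):
--     adj = {}
--     for e in street:
--         adj.setdefault(e[0], []).append(e[1])
--         adj.setdefault(e[1], []).append(e[0])
--     return ''.join(str(n) for n in adj.get(currentNode, []))
-- ===== Notes on version B (the rewrite author's own statement) =====
-- stated objective: idiomatic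
-- what changed: Replaced the per-edge if/elif string-building scan with building an adjacency dictionary in one pass over street and answering by a single dict lookup joined into a string.
import Mathlib
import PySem

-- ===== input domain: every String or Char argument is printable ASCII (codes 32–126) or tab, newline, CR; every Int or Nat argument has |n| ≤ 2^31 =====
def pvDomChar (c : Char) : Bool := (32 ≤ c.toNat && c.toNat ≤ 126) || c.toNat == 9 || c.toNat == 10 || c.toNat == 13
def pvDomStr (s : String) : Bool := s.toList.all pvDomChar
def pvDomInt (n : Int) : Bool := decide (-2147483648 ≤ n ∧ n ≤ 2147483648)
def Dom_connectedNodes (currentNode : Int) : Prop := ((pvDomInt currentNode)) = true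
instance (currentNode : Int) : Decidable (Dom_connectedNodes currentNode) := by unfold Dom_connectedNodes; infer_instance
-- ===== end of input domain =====

-- B builds an adjacency dictionary once and answers by a single lookup; same return value, different structure.

-- ===== PORT A =====
def streetA : List (List Int) :=
  [[0, 3, 6], [2, 3, 5], [3, 5, 7], [0, 4, 5], [1, 2, 5], [1, 5, 7], [1, 4, 5]]

-- loop over range(7); the indexing street[i][j] uses pyGetD, exact here since every
-- index 0 ≤ i < 7 = len(street) and j < 3 = len(street[i]) is in range (no IndexError).
def connectedNodes (currentNode : Int) : String :=
  String.ofList ((PySem.List.pyRange 0 7 1).foldl (fun nodes i =>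
    let e := PySem.List.pyGetD streetA i []
    if PySem.List.pyGetD e 0 0 = currentNode then
      nodes ++ PySem.Int.toChars (PySem.List.pyGetD e 1 0)
    else if PySem.List.pyGetD e 1 0 = currentNode then
      nodes ++ PySem.Int.toChars (PySem.List.pyGetD e 0 0)
    else nodes) [])

-- ===== PORT B =====
def streetB : List (List Int) :=
  [[0, 3, 6], [2, 3, 5], [3, 5, 7], [0, 4, 5], [1, 2, 5], [1, 5, 7], [1, 4, 5]]

-- adj.setdefault(k, []).append(v)  =  insert k (getD k [] ++ [v])
def adjB : PySem.Dict Int (List Int) :=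
  streetB.foldl (fun d e =>
    let e0 := PySem.List.pyGetD e 0 0
    let e1 := PySem.List.pyGetD e 1 0
    let d := d.insert e0 (d.getD e0 [] ++ [e1])
    d.insert e1 (d.getD e1 [] ++ [e0])) PySem.Dict.empty

def connectedNodes_alt (currentNode : Int) : String :=
  PySem.Str.join "" ((adjB.getD currentNode []).map PySem.Int.toStr)

-- ===== PRECONDITION & SPEC =====
def Spec_connectedNodes (currentNode : Int) (out : String) : Prop := out = connectedNodes_alt currentNode
instance (currentNode : Int) (out : String) : Decidable (Spec_connectedNodes currentNode out) := by unfold Spec_connectedNodes; infer_instance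

-- ===== CLAIM (what is proved, stated in full; the proofs are below) =====
def Claim_equal_connectedNodes : Prop := ∀ (currentNode : Int), Dom_connectedNodes currentNode → Spec_connectedNodes currentNode (connectedNodes currentNode)

-- ===== LEMMAS AND PROOFS =====

-- ===== VERDICT (by name: the statement is the Claim_ definition above) =====
theorem connectedNodes_spec : Claim_equal_connectedNodes := by
  intro n _
  unfold Spec_connectedNodes
  by_cases h0 : n = 0 <;> by_cases h1 : n = 1 <;> by_cases h2 : n = 2 <;>
    by_cases h3 : n = 3 <;> by_cases h4 : n = 4 <;> by_cases h5 : n = 5 <;>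
    first
      | (subst_vars; decide)
      | (have h0' : ¬((0:Int) = n) := fun h => h0 h.symm
         have h1' : ¬((1:Int) = n) := fun h => h1 h.symm
         have h2' : ¬((2:Int) = n) := fun h => h2 h.symm
         have h3' : ¬((3:Int) = n) := fun h => h3 h.symm
         have h4' : ¬((4:Int) = n) := fun h => h4 h.symm
         have h5' : ¬((5:Int) = n) := fun h => h5 h.symm
         simp [connectedNodes, connectedNodes_alt, streetA, adjB, streetB,
               PySem.List.pyRange, PySem.List.pyGetD, PySem.List.pyGet?,
               PySem.List.pyIdx?, PySem.Dict.getD, PySem.Dict.get?,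
               PySem.Dict.insert, PySem.Dict.empty, PySem.Str.join,
               List.range_succ, beq_iff_eq,
               h0', h1', h2', h3', h4', h5'])
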